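-- pv_equiv track=rewrite | github.com/somabencsik/AoC2025 | Day2/task2.py | get_wrong_ids
-- ===== SOURCE A (Python) =====
-- def is_sequence(number: str, sub_number: str) -> bool:
--     """
--     Check if a number is built up from the given sub number.
--
--     Arguments
--     ---------
--     number : str
--         The number to check
--
--     sub_number : str
--         The number to check with
--
--     Returns
--     -------
--     bool
--         True, if the number is built only from the sub_number, false otherwise
--     """
--     if len(number) % len(sub_number) != 0:
--         return False
--     if number.count(sub_number) != len(number) // len(sub_number):
--         return False
--     return True
--
-- def get_wrong_ids(ids: list[list[int]]) -> list[int]: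
--     """
--     Returns the wrong ids in a list.
--
--     Arguments
--     ---------
--     ids : list[list[int]]
--         List of list of numbers to check for wrong ID
--
--     Returns
--     -------
--     list[int]
--         List of wrong ids
--     """
--     wrong_ids = []
--     for id_list in ids:
--         for number in id_list:
--             number = str(number)
--             middle_index = len(number) // 2
--             for i in range(middle_index, 0, -1):
--                 sub_number = number[:i]
--                 if is_sequence(number, sub_number):
--                     wrong_ids.append(int(number))
--     return set(wrong_ids)
-- ===== SOURCE B (Python) =====
-- def get_wrong_ids(ids: list[list[int]]) -> list[int]:
--     # A number is "wrong" iff its decimal string is a nontrivial repetition of a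
--     # shorter block.  Classic O(L) test: s is a nontrivial power iff s occurs
--     # inside (s + s) with both endpoints chopped off.
--     wrong_ids = set()
--     for id_list in ids:
--         for number in id_list:
--             s = str(number)
--             if s in (s + s)[1:-1]:
--                 wrong_ids.add(int(s))
--     return wrong_ids
-- ===== Notes on version B (the rewrite author's own statement) =====
-- stated objective: faster
-- what changed: Replaces the per-number scan over all candidate block lengths with divisibility and substring-count checks by the single classic periodicity test 's in (s+s)[1:-1]', building the result set directly.
import Mathlib
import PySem

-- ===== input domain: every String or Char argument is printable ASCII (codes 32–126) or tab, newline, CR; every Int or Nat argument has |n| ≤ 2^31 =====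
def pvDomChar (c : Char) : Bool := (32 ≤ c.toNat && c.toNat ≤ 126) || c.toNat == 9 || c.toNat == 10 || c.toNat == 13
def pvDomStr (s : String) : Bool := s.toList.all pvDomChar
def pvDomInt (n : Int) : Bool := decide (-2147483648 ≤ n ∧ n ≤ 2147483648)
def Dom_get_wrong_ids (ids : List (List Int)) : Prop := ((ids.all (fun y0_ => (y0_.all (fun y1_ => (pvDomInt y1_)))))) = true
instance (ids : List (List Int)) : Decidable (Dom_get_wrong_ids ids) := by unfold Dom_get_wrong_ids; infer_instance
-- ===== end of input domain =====

-- B replaces A's per-number scan over all candidate block lengths (divisibility + substring count)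
-- by the classic single-substring-search periodicity test `s in (s+s)[1:-1]`; objective: faster.

-- ===== PORT A =====
-- helper is_sequence(number, sub_number) of Source A, on the List Char side
def pv_is_sequence (number : List Char) (sub_number : List Char) : Bool :=
  if PySem.Int.mod (PySem.Chars.len number) (PySem.Chars.len sub_number) ≠ 0 then false
  else if (PySem.Chars.count number sub_number : Int) ≠
      PySem.Int.floordiv (PySem.Chars.len number) (PySem.Chars.len sub_number) then false
  else true

def get_wrong_ids (ids : List (List Int)) : List Int :=
  let wrong_ids : List Int :=
    ids.foldl (fun wrong_ids id_list =>
      id_list.foldl (fun wrong_ids number =>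
        let s := PySem.Int.toChars number          -- number = str(number)
        let middle_index := PySem.Int.floordiv (PySem.Chars.len s) 2
        (PySem.List.pyRange middle_index 0 (-1)).foldl (fun wrong_ids i =>
          let sub_number := PySem.Chars.slice s none (some i)   -- number[:i]
          if pv_is_sequence s sub_number then
            wrong_ids ++ [(PySem.Int.ofChars? s).getD 0]        -- int(number); s = str(number) so never none
          else wrong_ids) wrong_ids) wrong_ids) []
  PySem.Set.ofList wrong_ids                        -- return set(wrong_ids)

-- ===== PORT B =====
def get_wrong_ids_alt (ids : List (List Int)) : List Int :=
  ids.foldl (fun wrong_ids id_list =>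
    id_list.foldl (fun wrong_ids number =>
      let s := PySem.Int.toChars number            -- s = str(number)
      if PySem.Chars.isIn s (PySem.Chars.slice (s ++ s) (some 1) (some (-1))) then   -- s in (s+s)[1:-1]
        PySem.Set.add wrong_ids ((PySem.Int.ofChars? s).getD 0)                      -- wrong_ids.add(int(s))
      else wrong_ids) wrong_ids) (PySem.Set.empty : PySem.Set Int)

-- ===== PRECONDITION & SPEC =====
def Spec_get_wrong_ids (ids : List (List Int)) (out : List Int) : Prop := out = get_wrong_ids_alt ids
instance (ids : List (List Int)) (out : List Int) : Decidable (Spec_get_wrong_ids ids out) := by unfold Spec_get_wrong_ids; infer_instance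

-- ===== CLAIM (what is proved, stated in full; the proofs are below) =====
def Claim_equal_get_wrong_ids : Prop := ∀ (ids : List (List Int)), Dom_get_wrong_ids ids → Spec_get_wrong_ids ids (get_wrong_ids ids)

-- ===== LEMMAS AND PROOFS =====

-- str(number) is never the empty string
theorem pv_toDigitsCore_len (b fuel n : Nat) (ds : List Char) :
    ds.length ≤ (Nat.toDigitsCore b fuel n ds).length := by
  induction fuel generalizing n ds with
  | zero => simp [Nat.toDigitsCore]
  | succ f ih =>
    rw [Nat.toDigitsCore]
    split
    · simp
    · exact le_trans (by simp) (ih (n / b) _)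

theorem pv_toChars_ne_nil (n : Int) : PySem.Int.toChars n ≠ [] := by
  unfold PySem.Int.toChars
  split
  · simp
  · rw [Nat.toDigits, Nat.toDigitsCore]
    split
    · simp
    · have h := pv_toDigitsCore_len 10 n.toNat (n.toNat / 10) [Nat.digitChar (n.toNat % 10)]
      intro hnil
      rw [hnil] at h
      simp at h

-- equations of the greedy occurrence counter PySem.Chars.count.go
theorem pv_go_zero (sub l : List Char) (acc : Nat) :
    PySem.Chars.count.go sub 0 l acc = acc := rfl

theorem pv_go_nil (sub : List Char) (fuel : Nat) (acc : Nat) :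
    PySem.Chars.count.go sub (fuel + 1) [] acc = acc := rfl

theorem pv_go_cons (sub : List Char) (fuel : Nat) (h : Char) (t : List Char) (acc : Nat) :
    PySem.Chars.count.go sub (fuel + 1) (h :: t) acc =
      if sub.isPrefixOf (h :: t) then
        PySem.Chars.count.go sub fuel (List.drop sub.length (h :: t)) (acc + 1)
      else PySem.Chars.count.go sub fuel t acc := rfl

theorem pv_go_acc (sub : List Char) (fuel : Nat) : ∀ (l : List Char) (acc : Nat),
    PySem.Chars.count.go sub fuel l acc = acc + PySem.Chars.count.go sub fuel l 0 := by
  induction fuel with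
  | zero => intro l acc; rw [pv_go_zero, pv_go_zero]; omega
  | succ f ih =>
    intro l acc
    cases l with
    | nil => rw [pv_go_nil, pv_go_nil]; omega
    | cons h t =>
      rw [pv_go_cons, pv_go_cons]
      by_cases hp : sub.isPrefixOf (h :: t)
      · rw [if_pos hp, if_pos hp, ih _ (acc + 1), ih _ (0 + 1)]
        omega
      · rw [if_neg hp, if_neg hp, ih t acc]

theorem pv_go_mul_le (sub : List Char) (hsub : sub ≠ []) : ∀ (fuel : Nat) (l : List Char),
    l.length ≤ fuel → PySem.Chars.count.go sub fuel l 0 * sub.length ≤ l.length := by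
  intro fuel
  induction fuel with
  | zero => intro l _; rw [pv_go_zero]; simp
  | succ f ih =>
    intro l hf
    cases l with
    | nil => rw [pv_go_nil]; simp
    | cons hd0 t =>
      have hs1 : 1 ≤ sub.length := List.length_pos_of_ne_nil hsub
      rw [pv_go_cons]
      by_cases hp : sub.isPrefixOf (hd0 :: t)
      · rw [if_pos hp, pv_go_acc]
        have hpre : sub <+: (hd0 :: t) := List.isPrefixOf_iff_prefix.mp hp
        have hle : sub.length ≤ t.length + 1 := by simpa using hpre.length_le
        have hd := ih (List.drop sub.length (hd0 :: t))
          (by simp only [List.length_drop, List.length_cons]; simp only [List.length_cons] at hf; omega)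
        simp only [List.length_drop, List.length_cons] at hd
        simp only [List.length_cons]
        have hexp : (0 + 1 + PySem.Chars.count.go sub f (List.drop sub.length (hd0 :: t)) 0) * sub.length
            = PySem.Chars.count.go sub f (List.drop sub.length (hd0 :: t)) 0 * sub.length + sub.length := by
          ring
        rw [hexp]
        omega
      · rw [if_neg hp]
        have := ih t (by simp only [List.length_cons] at hf; omega)
        simp only [List.length_cons]
        omega

theorem pv_go_repl (sub : List Char) (hsub : sub ≠ []) : ∀ (k fuel : Nat),
    k * sub.length ≤ fuel →
    PySem.Chars.count.go sub fuel (List.replicate k sub).flatten 0 = k := by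
  intro k
  induction k with
  | zero =>
    intro fuel _
    cases fuel with
    | zero => rw [List.replicate_zero, List.flatten_nil, pv_go_zero]
    | succ f => rw [List.replicate_zero, List.flatten_nil, pv_go_nil]
  | succ k ih =>
    intro fuel hf
    have hs1 : 1 ≤ sub.length := List.length_pos_of_ne_nil hsub
    have hmul : (k + 1) * sub.length = k * sub.length + sub.length := by ring
    cases fuel with
    | zero =>
      exfalso
      have : 0 < (k + 1) * sub.length := Nat.mul_pos (by omega) hs1
      omega
    | succ f =>
      have hflat : (List.replicate (k+1) sub).flatten = sub ++ (List.replicate k sub).flatten := by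
        rw [List.replicate_succ, List.flatten_cons]
      rw [hflat]
      have hne2 : sub ++ (List.replicate k sub).flatten ≠ [] := by simp [hsub]
      obtain ⟨h, t, hht⟩ := List.exists_cons_of_ne_nil hne2
      rw [hht, pv_go_cons, if_pos (List.isPrefixOf_iff_prefix.mpr (hht ▸ List.prefix_append sub _)),
        ← hht, List.drop_left, pv_go_acc]
      rw [ih f (by omega)]
      omega

theorem pv_go_eq_imp (sub : List Char) (hsub : sub ≠ []) : ∀ (k : Nat) (fuel : Nat) (l : List Char),
    l.length = k * sub.length → l.length ≤ fuel →
    PySem.Chars.count.go sub fuel l 0 = k → l = (List.replicate k sub).flatten := by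
  intro k
  induction k with
  | zero =>
    intro fuel l hlen _ _
    simp only [Nat.zero_mul] at hlen
    rw [List.replicate_zero, List.flatten_nil]
    exact List.length_eq_zero_iff.mp hlen
  | succ k ih =>
    intro fuel l hlen hf hcnt
    have hs1 : 1 ≤ sub.length := List.length_pos_of_ne_nil hsub
    have hmul : (k + 1) * sub.length = k * sub.length + sub.length := by ring
    obtain ⟨h, t, hht⟩ : ∃ h t, l = h :: t := by
      cases l with
      | nil =>
        exfalso
        simp only [List.length_nil] at hlen
        have : 0 < (k + 1) * sub.length := Nat.mul_pos (by omega) hs1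
        omega
      | cons h t => exact ⟨h, t, rfl⟩
    cases fuel with
    | zero => rw [hht] at hf; simp at hf
    | succ f =>
      subst hht
      rw [pv_go_cons] at hcnt
      by_cases hp : sub.isPrefixOf (h :: t)
      · rw [if_pos hp, pv_go_acc] at hcnt
        have hpre : sub <+: (h :: t) := List.isPrefixOf_iff_prefix.mp hp
        have htake : sub = List.take sub.length (h :: t) := List.prefix_iff_eq_take.mp hpre
        have hsplit : (h :: t) = sub ++ List.drop sub.length (h :: t) := by
          conv_lhs => rw [← List.take_append_drop sub.length (h :: t)]
          rw [← htake]
        have hlsub : sub.length ≤ (h :: t).length := hpre.length_le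
        have hdlen : (List.drop sub.length (h :: t)).length = k * sub.length := by
          simp only [List.length_drop, List.length_cons]
          simp only [List.length_cons] at hlsub hlen
          omega
        have hrest := ih f (List.drop sub.length (h :: t)) hdlen
          (by simp only [List.length_drop, List.length_cons]; simp only [List.length_cons] at hf; omega)
          (by omega)
        rw [List.replicate_succ, List.flatten_cons, ← hrest]
        exact hsplit
      · rw [if_neg hp] at hcnt
        have hb := pv_go_mul_le sub hsub f t (by simp only [List.length_cons] at hf; omega)
        rw [hcnt] at hb
        simp only [List.length_cons] at hlen
        omega

theorem pv_count_iff (l sub : List Char) (hsub : sub ≠ []) (k : Nat)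
    (hlen : l.length = k * sub.length) :
    PySem.Chars.count l sub = k ↔ l = (List.replicate k sub).flatten := by
  have hcount : PySem.Chars.count l sub = PySem.Chars.count.go sub l.length l 0 := by
    rw [PySem.Chars.count, if_neg (by simp [hsub])]
  constructor
  · intro h
    exact pv_go_eq_imp sub hsub k l.length l hlen le_rfl (by rw [← hcount, h])
  · intro h
    rw [hcount, h]
    have := pv_go_repl sub hsub k l.length (by omega)
    rw [h] at this
    exact this

-- flatten-of-replicate toolbox
theorem pv_flat_repl_length {α : Type} (k : Nat) (u : List α) :
    ((List.replicate k u).flatten).length = k * u.length := by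
  induction k with
  | zero => simp
  | succ k ih => rw [List.replicate_succ, List.flatten_cons, List.length_append, ih]; ring

theorem pv_flat_repl_comm {α : Type} (k : Nat) (u : List α) :
    (List.replicate k u).flatten ++ u = u ++ (List.replicate k u).flatten := by
  induction k with
  | zero => simp
  | succ k ih =>
    rw [List.replicate_succ, List.flatten_cons, List.append_assoc, ih, ← List.append_assoc]

theorem pv_getElem?_flat_repl {α : Type} (u : List α) : ∀ (k i : Nat), i < k * u.length →
    ((List.replicate k u).flatten)[i]? = u[i % u.length]? := by
  intro k
  induction k with
  | zero => intro i hi; simp at hi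
  | succ k ih =>
    intro i hi
    rw [List.replicate_succ, List.flatten_cons]
    by_cases hlt : i < u.length
    · rw [List.getElem?_append_left hlt, Nat.mod_eq_of_lt hlt]
    · have hge : u.length ≤ i := by omega
      have hmul : (k + 1) * u.length = k * u.length + u.length := by ring
      rw [List.getElem?_append_right hge, ih (i - u.length) (by omega)]
      congr 1
      conv_rhs => rw [show i = (i - u.length) + u.length by omega, Nat.add_mod_right]

-- rotations
theorem pv_rotate_pow {α : Type} (l : List α) (r : Nat) (h : l.rotate r = l) : ∀ (a : Nat),
    l.rotate (a * r) = l := by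
  intro a
  induction a with
  | zero => simp
  | succ a ih =>
    have : (a + 1) * r = a * r + r := by ring
    rw [this, ← List.rotate_rotate, ih, h]

theorem pv_rotate_gcd {α : Type} (l : List α) (r : Nat) (h : l.rotate r = l)
    (h1 : 1 ≤ r) (h2 : r < l.length) : l.rotate (Nat.gcd r l.length) = l := by
  have hnpos : 0 < l.length := by omega
  have hgr : Nat.gcd r l.length ≤ r := Nat.le_of_dvd (by omega) (Nat.gcd_dvd_left _ _)
  have hgn : Nat.gcd r l.length < l.length := by omega
  have hbez : (Nat.gcd r l.length : Int) =
      r * Nat.gcdA r l.length + l.length * Nat.gcdB r l.length := Nat.gcd_eq_gcd_ab r l.length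
  have hA0 : 0 ≤ Nat.gcdA r l.length % (l.length : Int) :=
    Int.emod_nonneg _ (by exact_mod_cast hnpos.ne')
  have hmodI : (((Nat.gcdA r l.length % (l.length : Int)).toNat : Int) * r) % l.length
      = Nat.gcd r l.length := by
    rw [Int.toNat_of_nonneg hA0]
    rw [Int.mul_emod, Int.emod_emod_of_dvd _ dvd_rfl, ← Int.mul_emod]
    have hswap : Nat.gcdA r l.length * (r : Int) =
        (Nat.gcd r l.length : Int) + (l.length : Int) * (- Nat.gcdB r l.length) := by
      rw [hbez]; ring
    rw [hswap, Int.add_mul_emod_self_left]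
    exact Int.emod_eq_of_lt (by positivity) (by exact_mod_cast hgn)
  have hmodN : ((Nat.gcdA r l.length % (l.length : Int)).toNat * r) % l.length
      = Nat.gcd r l.length := by exact_mod_cast hmodI
  rw [← hmodN, List.rotate_mod, pv_rotate_pow l r h _]

theorem pv_period_of_rotate {α : Type} (l : List α) (g : Nat) (h : l.rotate g = l)
    (h1 : 1 ≤ g) (hg : g ∣ l.length) :
    l = (List.replicate (l.length / g) (List.take g l)).flatten := by
  rcases eq_or_ne l [] with rfl | hl
  · simp
  have hnpos : 0 < l.length := List.length_pos_of_ne_nil hl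
  have hgn : g ≤ l.length := Nat.le_of_dvd hnpos hg
  have hulen : (List.take g l).length = g := by
    rw [List.length_take]; omega
  have hidx : ∀ j, j + g < l.length → l[j + g]? = l[j]? := by
    intro j hj
    have h0 : (l.rotate g)[j]? = l[j]? := by rw [h]
    rw [List.getElem?_rotate (by omega)] at h0
    rw [Nat.mod_eq_of_lt (by omega)] at h0
    exact h0
  have hper : ∀ i, i < l.length → l[i]? = l[i % g]? := by
    intro i
    induction i using Nat.strong_induction_on with
    | _ i ih =>
      intro hi
      by_cases hig : i < g
      · rw [Nat.mod_eq_of_lt hig]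
      · have hidx' := hidx (i - g) (by omega)
        rw [show i - g + g = i by omega] at hidx'
        rw [hidx', ih (i - g) (by omega) (by omega)]
        congr 1
        conv_rhs => rw [show i = (i - g) + g by omega, Nat.add_mod_right]
  have hlen2 : ((List.replicate (l.length / g) (List.take g l)).flatten).length = l.length := by
    rw [pv_flat_repl_length, hulen, Nat.div_mul_cancel hg]
  apply List.ext_getElem?
  intro i
  by_cases hi : i < l.length
  · rw [pv_getElem?_flat_repl (List.take g l) _ i
      (by rw [hulen, Nat.div_mul_cancel hg]; exact hi)]
    rw [hulen, hper i hi, List.getElem?_take, if_pos (Nat.mod_lt _ (by omega))]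
  · rw [List.getElem?_eq_none (by omega), List.getElem?_eq_none (by rw [hlen2]; omega)]

-- the slice [1:-1]
theorem pv_slice_one_negone {α : Type} (l : List α) :
    PySem.List.slice l (some 1) (some (-1)) = (l.drop 1).dropLast := by
  cases l with
  | nil => rfl
  | cons h t =>
    simp [PySem.List.slice, PySem.List.clampIdx, List.dropLast_eq_take]
    split_ifs <;> omega

theorem pv_dropLast_drop_comm {α : Type} (u : List α) (j : Nat) :
    (u.dropLast).drop j = (u.drop j).dropLast := by
  simp [List.dropLast_eq_take, List.drop_take]
  omega

theorem pv_prefix_dropLast {α : Type} (l u : List α) (h : l <+: u)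
    (hlen : l.length + 1 ≤ u.length) : l <+: u.dropLast := by
  rw [List.prefix_iff_eq_take] at h ⊢
  rw [List.dropLast_eq_take, List.take_take]
  rw [min_eq_left (by omega)]
  exact h

-- prefix-of-shifted-double ⟺ fixed by rotation
theorem pv_prefix_iff_rot (s : List Char) (r : Nat)
    (h1 : 1 ≤ r) (h2 : r + 1 ≤ s.length) :
    s <+: (s ++ s).drop r ↔ s.rotate r = s := by
  have hrn : r ≤ s.length := by omega
  have hdrop : (s ++ s).drop r = s.drop r ++ s := List.drop_append_of_le_length hrn
  have htake : List.take s.length (s.drop r ++ s) = s.drop r ++ s.take r := by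
    rw [List.take_append]
    congr 1
    · exact List.take_of_length_le (by simp)
    · congr 1
      simp only [List.length_drop]
      omega
  constructor
  · intro hpre
    rw [hdrop, List.prefix_iff_eq_take] at hpre
    rw [List.rotate_eq_drop_append_take hrn, ← htake, ← hpre]
  · intro hrot
    rw [hdrop, List.prefix_iff_eq_take, htake, ← List.rotate_eq_drop_append_take hrn, hrot]

-- fixed by a nontrivial rotation ⟺ built from a block of length ≤ n/2
def pvPeriodic (s : List Char) : Prop :=
  ∃ d : Nat, 1 ≤ d ∧ d ≤ s.length / 2 ∧ d ∣ s.length ∧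
    s = (List.replicate (s.length / d) (List.take d s)).flatten

theorem pv_periodic_iff_rot (s : List Char) (hs : s ≠ []) :
    pvPeriodic s ↔ ∃ r : Nat, 1 ≤ r ∧ r + 1 ≤ s.length ∧ s.rotate r = s := by
  have hnpos : 0 < s.length := List.length_pos_of_ne_nil hs
  constructor
  · rintro ⟨d, hd1, hd2, hdvd, hrep⟩
    have h2d : d * 2 ≤ s.length := (Nat.le_div_iff_mul_le (by omega)).mp hd2
    have hdn : d ≤ s.length := by omega
    have hulen : (List.take d s).length = d := by rw [List.length_take]; omega
    have hk1 : 1 ≤ s.length / d := by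
      rw [Nat.le_div_iff_mul_le (by omega)]; omega
    refine ⟨d, hd1, by omega, ?_⟩
    have hsplit : s = List.take d s ++ (List.replicate (s.length / d - 1) (List.take d s)).flatten := by
      conv_lhs => rw [hrep, show s.length / d = (s.length / d - 1) + 1 by omega]
      rw [List.replicate_succ, List.flatten_cons]
    have hdropd : s.drop d = (List.replicate (s.length / d - 1) (List.take d s)).flatten := by
      conv_lhs => rw [hsplit]
      exact List.drop_left' hulen
    have htaked : s.take d = List.take d s := rfl
    rw [List.rotate_eq_drop_append_take hdn, hdropd, htaked]
    conv_lhs => rw [pv_flat_repl_comm]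
    rw [← hsplit]
  · rintro ⟨r, hr1, hr2, hrot⟩
    have hrn : r < s.length := by omega
    have hground := pv_rotate_gcd s r hrot hr1 hrn
    have hg1 : 1 ≤ Nat.gcd r s.length := Nat.gcd_pos_of_pos_left _ (by omega)
    have hgdvd : Nat.gcd r s.length ∣ s.length := Nat.gcd_dvd_right r s.length
    have hgr : Nat.gcd r s.length ≤ r := Nat.le_of_dvd (by omega) (Nat.gcd_dvd_left r s.length)
    have hgn2 : Nat.gcd r s.length ≤ s.length / 2 := by
      obtain ⟨c, hc⟩ := hgdvd
      have hc2 : 2 ≤ c := by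
        rcases Nat.lt_or_ge c 2 with hlt | hge
        · exfalso; interval_cases c <;> omega
        · exact hge
      rw [Nat.le_div_iff_mul_le (by omega)]
      have := Nat.mul_le_mul_left (Nat.gcd r s.length) hc2
      omega
    exact ⟨_, hg1, hgn2, hgdvd, pv_period_of_rotate s _ hground hg1 hgdvd⟩

-- the per-string equivalence: B's substring test ⟺ A's "some block length works"
theorem pv_core (s : List Char) (hs : s ≠ []) :
    PySem.Chars.isIn s (PySem.Chars.slice (s ++ s) (some 1) (some (-1))) = true ↔ pvPeriodic s := by
  have hnpos : 0 < s.length := List.length_pos_of_ne_nil hs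
  have ht : PySem.Chars.slice (s ++ s) (some 1) (some (-1)) = ((s ++ s).drop 1).dropLast := by
    rw [PySem.Chars.slice_eq_listSlice, pv_slice_one_negone]
  rw [ht, ← PySem.Chars.exists_prefix_drop_iff_isIn, pv_periodic_iff_rot s hs]
  have htlen : (((s ++ s).drop 1).dropLast).length = 2 * s.length - 2 := by
    simp only [List.length_dropLast, List.length_drop, List.length_append]
    omega
  constructor
  · rintro ⟨j, hpre⟩
    have hjlen : s.length ≤ 2 * s.length - 2 - j := by
      have := hpre.length_le
      simp only [List.length_drop, htlen] at this
      omega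
    have hj : j + 2 ≤ s.length := by omega
    refine ⟨j + 1, by omega, by omega, ?_⟩
    rw [← pv_prefix_iff_rot s (j + 1) (by omega) (by omega)]
    have heq : (((s ++ s).drop 1).dropLast).drop j = ((s ++ s).drop (j + 1)).dropLast := by
      rw [pv_dropLast_drop_comm, List.drop_drop]
      congr 2
      omega
    rw [heq] at hpre
    exact hpre.trans (List.dropLast_prefix _)
  · rintro ⟨r, hr1, hr2, hrot⟩
    refine ⟨r - 1, ?_⟩
    have heq : (((s ++ s).drop 1).dropLast).drop (r - 1) = ((s ++ s).drop r).dropLast := by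
      rw [pv_dropLast_drop_comm, List.drop_drop]
      congr 2
      omega
    rw [heq]
    apply pv_prefix_dropLast
    · exact (pv_prefix_iff_rot s r hr1 hr2).mpr hrot
    · simp only [List.length_drop, List.length_append]
      omega

-- membership in range(m, 0, -1)
theorem pv_mem_pyRange_neg_one (m : Nat) (x : Int) :
    x ∈ PySem.List.pyRange (m : Int) 0 (-1) ↔ 1 ≤ x ∧ x ≤ (m : Int) := by
  unfold PySem.List.pyRange
  norm_num
  rcases Nat.eq_zero_or_pos m with rfl | hm
  · simp
    omega
  · rw [if_pos hm]
    constructor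
    · rintro ⟨k, hk, rfl⟩
      constructor <;> omega
    · rintro ⟨h1, h2⟩
      exact ⟨(m - x).toNat, by omega, by omega⟩

-- A's test at block length i equals the abstract periodicity condition at i.toNat
theorem pv_condA_iff (s : List Char) (hs : s ≠ []) (i : Int)
    (h1 : 1 ≤ i) (h2 : i ≤ ((s.length / 2 : Nat) : Int)) :
    pv_is_sequence s (PySem.Chars.slice s none (some i)) = true ↔
      (i.toNat ∣ s.length ∧
        s = (List.replicate (s.length / i.toNat) (List.take i.toNat s)).flatten) := by
  have hnpos : 0 < s.length := List.length_pos_of_ne_nil hs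
  have hi' : i = ((i.toNat : Nat) : Int) := (Int.toNat_of_nonneg (by omega)).symm
  have hd1 : 1 ≤ i.toNat := by omega
  have hd2 : i.toNat ≤ s.length / 2 := by omega
  have hdn : i.toNat ≤ s.length := le_trans hd2 (Nat.div_le_self s.length 2)
  have hslice : PySem.Chars.slice s none (some i) = s.take i.toNat := by
    rw [PySem.Chars.slice_eq_listSlice, hi']
    unfold PySem.List.slice PySem.List.clampIdx
    simp
  have hsublen : (s.take i.toNat).length = i.toNat := by
    rw [List.length_take]; omega
  have hsubne : s.take i.toNat ≠ [] := by
    intro hnil; rw [hnil] at hsublen; simp at hsublen; omega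
  rw [hslice]
  unfold pv_is_sequence
  rw [PySem.Chars.len_eq, PySem.Chars.len_eq, hsublen]
  by_cases hdvd : i.toNat ∣ s.length
  · have hmod : PySem.Int.mod (s.length : Int) (i.toNat : Int) = 0 :=
      (PySem.Int.mod_eq_zero_iff_dvd _ _).mpr (Int.natCast_dvd_natCast.mpr hdvd)
    rw [if_neg (fun hne => hne hmod)]
    have hfd : PySem.Int.floordiv (s.length : Int) (i.toNat : Int) = ((s.length / i.toNat : Nat) : Int) :=
      PySem.Int.floordiv_natCast s.length i.toNat
    rw [hfd]
    have hlen : s.length = (s.length / i.toNat) * (s.take i.toNat).length := by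
      rw [hsublen, Nat.div_mul_cancel hdvd]
    by_cases hcnt : PySem.Chars.count s (s.take i.toNat) = s.length / i.toNat
    · rw [if_neg (fun hne => hne (by exact_mod_cast hcnt))]
      exact ⟨fun _ => ⟨hdvd, (pv_count_iff s (s.take i.toNat) hsubne (s.length / i.toNat) hlen).mp hcnt⟩,
        fun _ => rfl⟩
    · rw [if_pos (fun hh => hcnt (by exact_mod_cast hh))]
      constructor
      · intro hh
        exact absurd hh (by simp)
      · rintro ⟨_, hrep⟩
        exact absurd ((pv_count_iff s (s.take i.toNat) hsubne (s.length / i.toNat) hlen).mpr hrep) hcnt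
  · have hmod : PySem.Int.mod (s.length : Int) (i.toNat : Int) ≠ 0 := by
      intro h0
      exact hdvd (Int.natCast_dvd_natCast.mp ((PySem.Int.mod_eq_zero_iff_dvd _ _).mp h0))
    rw [if_pos hmod]
    constructor
    · intro hh
      exact absurd hh (by simp)
    · rintro ⟨hdvd', _⟩
      exact absurd hdvd' hdvd

-- set plumbing
theorem pv_add_idem (w : PySem.Set Int) (x : Int) :
    PySem.Set.add (PySem.Set.add w x) x = PySem.Set.add w x := by
  unfold PySem.Set.add PySem.Set.contains
  by_cases hm : x ∈ w <;> simp [hm]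

theorem pv_update_replicate_add (x : Int) : ∀ (c : Nat) (w : PySem.Set Int),
    PySem.Set.update (PySem.Set.add w x) (List.replicate c x) = PySem.Set.add w x := by
  intro c
  induction c with
  | zero => intro w; rfl
  | succ c ih =>
    intro w
    rw [List.replicate_succ]
    show PySem.Set.update (PySem.Set.add (PySem.Set.add w x) x) (List.replicate c x) = _
    rw [pv_add_idem, ih]

theorem pv_update_replicate (w : PySem.Set Int) (c : Nat) (x : Int) :
    PySem.Set.update w (List.replicate c x) = if c = 0 then w else PySem.Set.add w x := by
  cases c with
  | zero => rfl
  | succ c =>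
    rw [List.replicate_succ, if_neg (by omega)]
    show PySem.Set.update (PySem.Set.add w x) (List.replicate c x) = _
    exact pv_update_replicate_add x c w

-- closed form of A's nested loops
theorem pv_A_closed (ids : List (List Int)) :
    get_wrong_ids ids = PySem.Set.ofList (ids.flatMap (fun id_list => id_list.flatMap (fun number =>
      let s := PySem.Int.toChars number
      ((PySem.List.pyRange (PySem.Int.floordiv (PySem.Chars.len s) 2) 0 (-1)).filter
          (fun i => pv_is_sequence s (PySem.Chars.slice s none (some i)))).map
        (fun _ => (PySem.Int.ofChars? s).getD 0)))) := by
  unfold get_wrong_ids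
  simp only [PySem.List.foldl_append_if, PySem.List.foldl_append_eq_flatMap]
  simp

-- one step of the loops agree
theorem pv_per_number (w : PySem.Set Int) (number : Int) :
    PySem.Set.update w
      (let s := PySem.Int.toChars number;
        ((PySem.List.pyRange (PySem.Int.floordiv (PySem.Chars.len s) 2) 0 (-1)).filter
            (fun i => pv_is_sequence s (PySem.Chars.slice s none (some i)))).map
          (fun _ => (PySem.Int.ofChars? s).getD 0)) =
    (let s := PySem.Int.toChars number;
      if PySem.Chars.isIn s (PySem.Chars.slice (s ++ s) (some 1) (some (-1))) then
        PySem.Set.add w ((PySem.Int.ofChars? s).getD 0)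
      else w) := by
  simp only []
  set s := PySem.Int.toChars number with hsdef
  have hsne : s ≠ [] := pv_toChars_ne_nil number
  set n := s.length with hn
  set v := (PySem.Int.ofChars? s).getD 0 with hv
  have hmid : PySem.Int.floordiv (PySem.Chars.len s) 2 = ((n / 2 : Nat) : Int) := by
    rw [PySem.Chars.len_eq]
    exact_mod_cast PySem.Int.floordiv_natCast n 2
  rw [hmid]
  set flt := (PySem.List.pyRange ((n / 2 : Nat) : Int) 0 (-1)).filter
      (fun i => pv_is_sequence s (PySem.Chars.slice s none (some i))) with hflt
  rw [List.map_const', pv_update_replicate]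
  by_cases hb : PySem.Chars.isIn s (PySem.Chars.slice (s ++ s) (some 1) (some (-1))) = true
  · rw [if_pos hb]
    obtain ⟨d, hd1, hd2, hdvd, hrep⟩ := (pv_core s hsne).mp hb
    have hmem : ((d : Int)) ∈ PySem.List.pyRange ((n / 2 : Nat) : Int) 0 (-1) :=
      (pv_mem_pyRange_neg_one (n / 2) (d : Int)).mpr ⟨by exact_mod_cast hd1, by exact_mod_cast hd2⟩
    have hcond : pv_is_sequence s (PySem.Chars.slice s none (some (d : Int))) = true := by
      rw [pv_condA_iff s hsne (d : Int) (by exact_mod_cast hd1) (by exact_mod_cast hd2)]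
      simpa using ⟨hdvd, hrep⟩
    have hne : flt ≠ [] := by
      intro hnil
      have : (d : Int) ∈ flt := List.mem_filter.mpr ⟨hmem, hcond⟩
      rw [hnil] at this
      simp at this
    rw [if_neg (by simpa [List.length_eq_zero_iff] using hne)]
  · rw [if_neg hb]
    have hnone : ∀ i ∈ PySem.List.pyRange ((n / 2 : Nat) : Int) 0 (-1),
        ¬ pv_is_sequence s (PySem.Chars.slice s none (some i)) = true := by
      intro i hi hc
      obtain ⟨hi1, hi2⟩ := (pv_mem_pyRange_neg_one (n / 2) i).mp hi
      obtain ⟨hdvd, hrep⟩ := (pv_condA_iff s hsne i hi1 hi2).mp hc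
      apply hb
      rw [pv_core s hsne]
      exact ⟨i.toNat, by omega, by omega, hdvd, hrep⟩
    have : flt = [] := List.filter_eq_nil_iff.mpr hnone
    rw [if_pos (by simp [this])]

-- fold the per-step equality through both loops
theorem pv_inner_fold (L : List Int) : ∀ (w : PySem.Set Int),
    PySem.Set.update w (L.flatMap (fun number =>
      let s := PySem.Int.toChars number
      ((PySem.List.pyRange (PySem.Int.floordiv (PySem.Chars.len s) 2) 0 (-1)).filter
          (fun i => pv_is_sequence s (PySem.Chars.slice s none (some i)))).map
        (fun _ => (PySem.Int.ofChars? s).getD 0))) =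
    L.foldl (fun wrong_ids number =>
      let s := PySem.Int.toChars number
      if PySem.Chars.isIn s (PySem.Chars.slice (s ++ s) (some 1) (some (-1))) then
        PySem.Set.add wrong_ids ((PySem.Int.ofChars? s).getD 0)
      else wrong_ids) w := by
  induction L with
  | nil => intro w; rfl
  | cons a L ih =>
    intro w
    rw [List.flatMap_cons, List.foldl_cons]
    show PySem.Set.update w (_ ++ _) = _
    unfold PySem.Set.update
    rw [List.foldl_append]
    have h1 := pv_per_number w a
    unfold PySem.Set.update at h1 ih
    rw [h1, ih]

theorem pv_outer_fold (ids : List (List Int)) : ∀ (w : PySem.Set Int),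
    PySem.Set.update w (ids.flatMap (fun id_list => id_list.flatMap (fun number =>
      let s := PySem.Int.toChars number
      ((PySem.List.pyRange (PySem.Int.floordiv (PySem.Chars.len s) 2) 0 (-1)).filter
          (fun i => pv_is_sequence s (PySem.Chars.slice s none (some i)))).map
        (fun _ => (PySem.Int.ofChars? s).getD 0)))) =
    ids.foldl (fun wrong_ids id_list =>
      id_list.foldl (fun wrong_ids number =>
        let s := PySem.Int.toChars number
        if PySem.Chars.isIn s (PySem.Chars.slice (s ++ s) (some 1) (some (-1))) then
          PySem.Set.add wrong_ids ((PySem.Int.ofChars? s).getD 0)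
        else wrong_ids) wrong_ids) w := by
  induction ids with
  | nil => intro w; rfl
  | cons L ids ih =>
    intro w
    rw [List.flatMap_cons, List.foldl_cons]
    unfold PySem.Set.update
    rw [List.foldl_append]
    have h1 := pv_inner_fold L w
    unfold PySem.Set.update at h1 ih
    rw [h1, ih]

-- ===== VERDICT (by name: the statement is the Claim_ definition above) =====
theorem get_wrong_ids_spec : Claim_equal_get_wrong_ids := by
  intro ids _
  unfold Spec_get_wrong_ids
  rw [pv_A_closed]
  rw [PySem.Set.ofList_eq_foldl]
  have := pv_outer_fold ids (PySem.Set.empty : PySem.Set Int)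
  unfold PySem.Set.update at this
  rw [show (PySem.Set.empty : PySem.Set Int) = ([] : List Int) from rfl] at this
  rw [this]
  rfl
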